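-- pv_equiv track=rewrite | github.com/GitdohunKim/boj-programmers-solution | 프로그래머스/unrated/181890. 왼쪽 오른쪽/왼쪽 오른쪽.py | solution
-- ===== SOURCE A (Python) =====
-- def solution(str_list):
--     answer = []
--     i = 0
--     while i < len(str_list):
--         if str_list[i] == 'l':
--             answer = str_list[:i]
--             break
--         elif str_list[i] == 'r':
--             answer = str_list[i + 1:]
--             break
--         i += 1
--     return answer
-- ===== SOURCE B (Python) =====
-- def solution(str_list):
--     n = len(str_list)
--     li = str_list.index('l') if 'l' in str_list else n
--     ri = str_list.index('r') if 'r' in str_list else n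
--     if li == n and ri == n:
--         return []
--     return str_list[:li] if li < ri else str_list[ri + 1:]
-- ===== Notes on version B (the rewrite author's own statement) =====
-- stated objective: alternative
-- what changed: Replaces the single index-scan loop with break by two whole-list index lookups ('l' and 'r') and one comparison deciding which slice to return.
import Mathlib
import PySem

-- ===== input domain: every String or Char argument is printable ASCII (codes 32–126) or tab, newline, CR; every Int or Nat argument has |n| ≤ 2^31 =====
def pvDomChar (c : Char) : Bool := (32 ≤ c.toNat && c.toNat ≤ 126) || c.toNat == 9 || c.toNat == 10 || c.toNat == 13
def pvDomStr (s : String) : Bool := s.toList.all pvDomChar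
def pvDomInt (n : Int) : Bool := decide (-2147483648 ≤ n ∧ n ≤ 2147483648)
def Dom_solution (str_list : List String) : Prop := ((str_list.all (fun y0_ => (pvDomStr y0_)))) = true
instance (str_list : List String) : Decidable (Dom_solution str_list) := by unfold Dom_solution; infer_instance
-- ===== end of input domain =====

-- B replaces A's single scan-with-break by two index lookups and a comparison (alternative decomposition, same cost).

-- ===== PORT A =====
-- the while loop of A: index i, break returns the slice, fall-through keeps answer = []
def solutionLoopA (str_list : List String) (i : Nat) : List String :=
  if h : i < str_list.length then
    if str_list[i] = "l" then str_list.take i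
    else if str_list[i] = "r" then str_list.drop (i + 1)
    else solutionLoopA str_list (i + 1)
  else []
termination_by str_list.length - i

def solution (str_list : List String) : List String := solutionLoopA str_list 0

-- ===== PORT B =====
def solution_alt (str_list : List String) : List String :=
  let n := str_list.length
  let li := (PySem.List.index? str_list "l").getD n
  let ri := (PySem.List.index? str_list "r").getD n
  if li = n ∧ ri = n then []
  else if li < ri then str_list.take li else str_list.drop (ri + 1)

-- ===== PRECONDITION & SPEC =====
def Spec_solution (str_list : List String) (out : List String) : Prop := out = solution_alt str_list
instance (str_list : List String) (out : List String) : Decidable (Spec_solution str_list out) := by unfold Spec_solution; infer_instance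

-- ===== CLAIM (what is proved, stated in full; the proofs are below) =====
def Claim_equal_solution : Prop := ∀ (str_list : List String), Dom_solution str_list → Spec_solution str_list (solution str_list)

-- ===== LEMMAS AND PROOFS =====

-- what B computes, phrased over the suffix starting at offset i
def rhsLR (xs : List String) (i : Nat) (suf : List String) : List String :=
  let li := (PySem.List.index? suf "l").getD suf.length
  let ri := (PySem.List.index? suf "r").getD suf.length
  if li = suf.length ∧ ri = suf.length then []
  else if li < ri then xs.take (i + li) else xs.drop (i + ri + 1)

theorem index?_lt_length {xs : List String} {v : String} {k : Nat}
    (h : PySem.List.index? xs v = some k) : k < xs.length := by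
  obtain ⟨hk, _⟩ := PySem.List.getElem_of_index?_eq_some h
  exact hk

theorem loopA_eq_rhs (xs : List String) :
    ∀ (suf : List String) (i : Nat), xs.drop i = suf → solutionLoopA xs i = rhsLR xs i suf := by
  intro suf
  induction suf with
  | nil =>
    intro i hd
    have hlen : xs.length ≤ i := by
      have := congrArg List.length hd
      simp [List.length_drop] at this
      omega
    rw [solutionLoopA, dif_neg (by omega)]
    simp [rhsLR, PySem.List.index?]
  | cons h t ih =>
    intro i hd
    have hlt : i < xs.length := by
      have := congrArg List.length hd
      simp [List.length_drop] at this
      omega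
    have hget : xs[i] = h := by
      have h0 : (xs.drop i).head? = xs[i]? := List.head?_drop ..
      rw [hd] at h0
      simp only [List.head?_cons] at h0
      have := List.getElem?_eq_getElem hlt
      rw [this] at h0
      exact (Option.some.injEq ..).mp h0.symm
    have hdt : xs.drop (i + 1) = t := by
      have h1 : (xs.drop i).tail = xs.drop (i + 1) := by rw [List.tail_drop]
      rw [← h1, hd, List.tail_cons]
    rw [solutionLoopA, dif_pos hlt]
    simp only [hget]
    by_cases hl : h = "l"
    · -- head is "l": A takes the prefix; li = 0, any ri in the tail is ≥ 1
      subst hl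
      rw [if_pos rfl]
      have hri := PySem.List.index?_cons_of_ne (x := "l") (v := "r") t (by decide)
      rcases hr' : PySem.List.index? t "r" with _ | m <;> rw [hr'] at hri <;>
        simp only [rhsLR, PySem.List.index?_cons_self, hri, Option.map_none, Option.map_some,
          Option.getD_some, Option.getD_none, List.length_cons] <;>
        split_ifs <;> first | rfl | omega | (congr 1; omega) | simp_all
    · by_cases hr : h = "r"
      · -- head is "r": A drops past it; ri = 0, any li in the tail is ≥ 1
        subst hr
        rw [if_neg (fun hc => hl hc), if_pos rfl]
        have hli := PySem.List.index?_cons_of_ne (x := "r") (v := "l") t (by decide)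
        rcases hl' : PySem.List.index? t "l" with _ | k <;> rw [hl'] at hli <;>
          simp only [rhsLR, PySem.List.index?_cons_self, hli, Option.map_none, Option.map_some,
            Option.getD_some, Option.getD_none, List.length_cons] <;>
          split_ifs <;> first | rfl | omega | (congr 1; omega) | simp_all
      · -- head is neither: A recurses; both indices shift by one
        rw [if_neg (fun hc => hl hc), if_neg (fun hc => hr hc)]
        rw [ih (i + 1) hdt]
        have hli := PySem.List.index?_cons_of_ne (x := h) (v := "l") t hl
        have hri := PySem.List.index?_cons_of_ne (x := h) (v := "r") t hr
        rcases hl' : PySem.List.index? t "l" with _ | k <;>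
          rcases hr' : PySem.List.index? t "r" with _ | m <;>
          rw [hl'] at hli <;> rw [hr'] at hri
        · simp only [rhsLR, hli, hri, hl', hr', Option.map_none,
            Option.getD_none, List.length_cons]
          split_ifs <;> first | rfl | omega | (congr 1; omega)
        · have hm := index?_lt_length hr'
          simp only [rhsLR, hli, hri, hl', hr', Option.map_none, Option.map_some,
            Option.getD_some, Option.getD_none, List.length_cons]
          split_ifs <;> first | rfl | omega | (congr 1; omega)
        · have hk := index?_lt_length hl'
          simp only [rhsLR, hli, hri, hl', hr', Option.map_none, Option.map_some,
            Option.getD_some, Option.getD_none, List.length_cons]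
          split_ifs <;> first | rfl | omega | (congr 1; omega)
        · have hk := index?_lt_length hl'
          have hm := index?_lt_length hr'
          simp only [rhsLR, hli, hri, hl', hr', Option.map_some,
            Option.getD_some, List.length_cons]
          split_ifs <;> first | rfl | omega | (congr 1; omega)

-- ===== VERDICT (by name: the statement is the Claim_ definition above) =====
theorem solution_spec : Claim_equal_solution := by
  intro xs _
  unfold Spec_solution solution solution_alt
  rw [loopA_eq_rhs xs xs 0 (by simp)]
  simp [rhsLR]
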